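-- pv_equiv track=rewrite | github.com/manikantaoruganti/codeatlas | backend/analysis_engine/metrics_calculator.py | detect_duplication
-- ===== SOURCE A (Python) =====
-- from typing import Dict, Any, List
--
-- def detect_duplication(files: List[Dict[str, Any]]) -> int:
--     if not isinstance(files, list):
--         return 0
--
--     all_code = '\n'.join([str(f.get('code', '')) for f in files if isinstance(f, dict)])
--     lines = [l.strip() for l in all_code.split('\n') if l.strip()]
--
--     duplicates = 0
--     seen = set()
--     for line in lines:
--         if len(line) > 20:
--             if line in seen:
--                 duplicates += 1
--             seen.add(line)
--
--     return duplicates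
-- ===== SOURCE B (Python) =====
-- from typing import Dict, Any, List
--
-- def detect_duplication(files: List[Dict[str, Any]]) -> int:
--     if not isinstance(files, list):
--         return 0
--
--     all_code = '\n'.join([str(f.get('code', '')) for f in files if isinstance(f, dict)])
--     lines = [l.strip() for l in all_code.split('\n') if l.strip()]
--
--     # sort the long lines so equal lines become adjacent, then count adjacent equal pairs
--     longs = sorted(l for l in lines if len(l) > 20)
--     return sum(1 for a, b in zip(longs, longs[1:]) if a == b)
-- ===== Notes on version B (the rewrite author's own statement) =====
-- stated objective: alternative
-- what changed: Replaces A's single pass with a seen-set and inline increment by a sort-then-scan algorithm: the long lines are sorted so equal lines become adjacent, and the answer is the number of adjacent equal pairs in the sorted list.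
import Mathlib
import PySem

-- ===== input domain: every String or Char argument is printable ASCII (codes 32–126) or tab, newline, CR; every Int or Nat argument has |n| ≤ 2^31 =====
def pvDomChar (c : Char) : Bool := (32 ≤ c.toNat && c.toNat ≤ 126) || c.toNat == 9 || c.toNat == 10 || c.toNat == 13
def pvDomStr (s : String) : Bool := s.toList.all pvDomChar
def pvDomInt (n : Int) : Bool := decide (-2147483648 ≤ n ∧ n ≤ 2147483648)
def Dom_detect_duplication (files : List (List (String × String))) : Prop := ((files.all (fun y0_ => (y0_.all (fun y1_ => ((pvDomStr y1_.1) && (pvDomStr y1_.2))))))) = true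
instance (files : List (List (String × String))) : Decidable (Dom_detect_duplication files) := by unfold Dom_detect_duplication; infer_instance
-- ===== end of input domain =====

-- B replaces A's inline seen-set duplicate counter by sort-then-scan: the long lines are
-- sorted so equal lines become adjacent, and adjacent equal pairs are counted; same result, different algorithm.


-- shared preprocessing (byte-identical in A and B):
-- all_code = '\n'.join(str(f.get('code','')) for f in files); lines = [l.strip() for l in all_code.split('\n') if l.strip()]
def pvLines (files : List (List (String × String))) : List String :=
  let all_code := PySem.Str.join "\n" (files.map (fun f => (PySem.Dict.mk f).getD "code" ""))
  (((PySem.Str.split? all_code "\n").getD []).filter (fun l => PySem.Str.strip l != "")).map PySem.Str.strip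

-- ===== PORT A =====
-- A: one loop over lines keeping (duplicates, seen-set); increments when a long line was seen.
def detect_duplication (files : List (List (String × String))) : Int :=
  let lines := pvLines files
  (lines.foldl (fun (st : Int × PySem.Set String) line =>
      if PySem.Str.len line > 20 then
        ((if PySem.Set.contains st.2 line then st.1 + 1 else st.1), PySem.Set.add st.2 line)
      else st) (0, PySem.Set.empty)).1

-- ===== PORT B =====
-- B: sort the long lines so equal lines are adjacent, then count adjacent equal pairs.
def detect_duplication_alt (files : List (List (String × String))) : Int :=
  let lines := pvLines files
  let longs := PySem.List.sorted (lines.filter (fun l => PySem.Str.len l > 20)) (fun x => x) false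
  (longs.zip (PySem.List.slice longs (some 1) none)).foldl
    (fun (s : Int) p => if p.1 == p.2 then s + 1 else s) 0

-- ===== PRECONDITION & SPEC =====
def Spec_detect_duplication (files : List (List (String × String))) (out : Int) : Prop := out = detect_duplication_alt files
instance (files : List (List (String × String))) (out : Int) : Decidable (Spec_detect_duplication files out) := by unfold Spec_detect_duplication; infer_instance

-- ===== CLAIM (what is proved, stated in full; the proofs are below) =====
def Claim_equal_detect_duplication : Prop := ∀ (files : List (List (String × String))), Dom_detect_duplication files → Spec_detect_duplication files (detect_duplication files)

-- ===== LEMMAS AND PROOFS =====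

-- A's guarded fold = fold over the filtered list (the loop only touches long lines)
theorem pv_foldl_guard {α β : Type} (P : α → Prop) [DecidablePred P] (f : β → α → β)
    (l : List α) (init : β) :
    l.foldl (fun st x => if P x then f st x else st) init
      = (l.filter (fun x => decide (P x))).foldl f init := by
  induction l generalizing init with
  | nil => rfl
  | cons x xs ih =>
    by_cases h : P x <;> simp [h, ih]

-- A's loop over any list l from the empty state yields (|l| - |set(l)|, set(l))
theorem pv_aloop (l : List String) :
    l.foldl (fun (st : Int × PySem.Set String) line =>
        ((if PySem.Set.contains st.2 line then st.1 + 1 else st.1), PySem.Set.add st.2 line))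
      (0, PySem.Set.empty)
    = ((l.length : Int) - (PySem.Set.ofList l).length, PySem.Set.ofList l) := by
  induction l using List.reverseRecOn with
  | nil => simp [PySem.Set.ofList, PySem.Set.empty]
  | append_singleton xs x ih =>
    have hof : PySem.Set.ofList (xs ++ [x]) = PySem.Set.add (PySem.Set.ofList xs) x := by
      rw [PySem.Set.ofList_eq_foldl, PySem.Set.ofList_eq_foldl, List.foldl_append]; rfl
    rw [List.foldl_append, ih, List.foldl_cons, List.foldl_nil, hof]
    by_cases h : PySem.Set.contains (PySem.Set.ofList xs) x = true
    · have hadd : PySem.Set.add (PySem.Set.ofList xs) x = PySem.Set.ofList xs := by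
        unfold PySem.Set.add; rw [if_pos h]
      rw [if_pos h, hadd]
      refine Prod.ext ?_ rfl
      simp only [List.length_append, List.length_cons, List.length_nil]
      push_cast; ring
    · have hadd : PySem.Set.add (PySem.Set.ofList xs) x = PySem.Set.ofList xs ++ [x] := by
        unfold PySem.Set.add; rw [if_neg h]
      rw [if_neg h, hadd]
      refine Prod.ext ?_ rfl
      simp only [List.length_append, List.length_cons, List.length_nil]
      push_cast; ring

-- first occurrences dedup has length = card of toFinset
theorem pv_ofList_length (l : List String) :
    (PySem.Set.ofList l).length = l.toFinset.card := by
  have hnd : (PySem.Set.ofList l).Nodup := PySem.Set.nodup_ofList l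
  have hfin : (PySem.Set.ofList l).toFinset = l.toFinset := by
    ext x; simp [PySem.Set.mem_ofList]
  rw [← List.toFinset_card_of_nodup hnd, hfin]

-- on a sorted list, the number of adjacent equal pairs is length - number of distinct values
theorem pv_adj_sorted (s : List String) (hs : s.Pairwise (· ≤ ·)) :
    ((s.zip s.tail).countP (fun p => p.1 == p.2)) = s.length - s.toFinset.card := by
  induction s with
  | nil => simp
  | cons a t ih =>
    cases t with
    | nil => simp
    | cons b t' =>
      have htail : (b :: t').Pairwise (· ≤ ·) := (List.pairwise_cons.mp hs).2
      have hrec := ih htail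
      have hzip : ((a :: b :: t').zip (a :: b :: t').tail)
          = (a, b) :: ((b :: t').zip (b :: t').tail) := by simp
      have hcard_le : (b :: t').toFinset.card ≤ (b :: t').length := List.toFinset_card_le _
      rw [hzip, List.countP_cons]
      by_cases hab : a = b
      · have hmem : a ∈ b :: t' := by simp [hab]
        have hcard : (a :: b :: t').toFinset.card = (b :: t').toFinset.card := by
          rw [List.toFinset_cons, Finset.card_insert_of_mem (by simpa using hmem)]
        rw [hrec, hcard, if_pos (by simp [hab] : (a == b) = true)]
        simp only [List.length_cons] at hcard_le ⊢
        omega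
      · have hle : ∀ y ∈ b :: t', a ≤ y := (List.pairwise_cons.mp hs).1
        have haltb : a < b := lt_of_le_of_ne (hle b (by simp)) hab
        have hnot : a ∉ b :: t' := by
          intro hmem
          rcases List.mem_cons.mp hmem with h | h
          · exact hab h
          · have hbx : b ≤ a := (List.pairwise_cons.mp htail).1 a h
            exact absurd (lt_of_lt_of_le haltb hbx) (lt_irrefl a)
        have hcard : (a :: b :: t').toFinset.card = (b :: t').toFinset.card + 1 := by
          rw [List.toFinset_cons, Finset.card_insert_of_notMem (by simpa using hnot)]
        have hne : (a == b) = false := by simp [hab]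
        rw [hne, if_neg (by simp), hrec, hcard]
        simp only [List.length_cons] at hcard_le ⊢
        omega

-- A = B for the shared line list, abstracted over that list
theorem pv_main (ls : List String) :
    (ls.foldl (fun (st : Int × PySem.Set String) line =>
        if PySem.Str.len line > 20 then
          ((if PySem.Set.contains st.2 line then st.1 + 1 else st.1), PySem.Set.add st.2 line)
        else st) (0, PySem.Set.empty)).1
    = ((PySem.List.sorted (ls.filter (fun l => PySem.Str.len l > 20)) (fun x => x) false).zip
         (PySem.List.slice (PySem.List.sorted (ls.filter (fun l => PySem.Str.len l > 20)) (fun x => x) false) (some 1) none)).foldl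
         (fun (s : Int) p => if p.1 == p.2 then s + 1 else s) 0 := by
  rw [pv_foldl_guard (fun line => PySem.Str.len line > 20)
        (fun (st : Int × PySem.Set String) line =>
          ((if PySem.Set.contains st.2 line then st.1 + 1 else st.1), PySem.Set.add st.2 line))]
  set l0 := ls.filter (fun line => decide (PySem.Str.len line > 20)) with hl0
  rw [pv_aloop]
  set s := PySem.List.sorted l0 (fun x => x) false with hsdef
  have hperm : s.Perm l0 := PySem.List.sorted_perm l0 (fun x => x) false
  have hpw : s.Pairwise (· ≤ ·) := by
    have := PySem.List.sorted_pairwise l0 (fun x => x)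
    simpa [hsdef] using this
  rw [PySem.List.slice_from_one, PySem.List.foldl_count_if (fun p : String × String => p.1 == p.2)]
  rw [pv_adj_sorted s hpw]
  have hlen : s.length = l0.length := hperm.length_eq
  have hfin : s.toFinset = l0.toFinset := by ext x; simp [hperm.mem_iff]
  have hcard_le : l0.toFinset.card ≤ l0.length := List.toFinset_card_le _
  rw [pv_ofList_length, hlen, hfin, Nat.cast_sub hcard_le]
  ring

-- ===== VERDICT (by name: the statement is the Claim_ definition above) =====
theorem detect_duplication_spec : Claim_equal_detect_duplication := by
  intro files _
  show detect_duplication files = detect_duplication_alt files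
  simp only [detect_duplication, detect_duplication_alt]
  exact pv_main (pvLines files)
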